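-- pv_equiv track=rewrite | github.com/dexedv/gamingbot | cogs/ranks.py | get_voice_rank
-- ===== SOURCE A (Python) =====
-- VOICE_RANKS = [
--     (0,          "🔇", "Stiller Zuhörer"),
--     (3600,       "🔉", "Teilnehmer"),        # 1h
--     (18000,      "🔊", "Gesprächspartner"),  # 5h
--     (36000,      "🎙️", "Redner"),            # 10h
--     (90000,      "⭐", "Aktiver"),           # 25h
--     (180000,     "🌟", "Veteran"),           # 50h
--     (360000,     "💎", "Elite"),             # 100h
--     (720000,     "👑", "Legende"),           # 200h
-- ]
--
-- def get_voice_rank(seconds: int) -> tuple[str, str, int, int | None]: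
--     rank = VOICE_RANKS[0]
--     for r in VOICE_RANKS:
--         if seconds >= r[0]:
--             rank = r
--         else:
--             break
--     idx = VOICE_RANKS.index(rank)
--     next_t = VOICE_RANKS[idx + 1][0] if idx + 1 < len(VOICE_RANKS) else None
--     return rank[1], rank[2], rank[0], next_t
-- ===== SOURCE B (Python) =====
-- VOICE_RANKS = [
--     (0,          "\U0001F507", "Stiller Zuh\u00f6rer"),
--     (3600,       "\U0001F509", "Teilnehmer"),
--     (18000,      "\U0001F50A", "Gespr\u00e4chspartner"),
--     (36000,      "\U0001F399\ufe0f", "Redner"),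
--     (90000,      "\u2b50", "Aktiver"),
--     (180000,     "\U0001F31F", "Veteran"),
--     (360000,     "\U0001F48E", "Elite"),
--     (720000,     "\U0001F451", "Legende"),
-- ]
--
-- def get_voice_rank(seconds: int) -> tuple[str, str, int, int | None]:
--     # binary search for the last tier whose threshold is <= seconds
--     lo, hi = 0, len(VOICE_RANKS)
--     while lo < hi:
--         mid = (lo + hi) // 2
--         if VOICE_RANKS[mid][0] <= seconds:
--             lo = mid + 1
--         else:
--             hi = mid
--     idx = max(lo - 1, 0)  # seconds below the first threshold still yields tier 0
--     t, emoji, name = VOICE_RANKS[idx]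
--     next_t = VOICE_RANKS[idx + 1][0] if idx + 1 < len(VOICE_RANKS) else None
--     return emoji, name, t, next_t
-- ===== Notes on version B (the rewrite author's own statement) =====
-- stated objective: alternative
-- what changed: Replaced A's linear scan-and-track plus a list.index() re-scan with a single binary search for the last tier threshold <= seconds (index clamped to 0 for negative seconds), reading the tier and next threshold directly at that index.
import Mathlib
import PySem

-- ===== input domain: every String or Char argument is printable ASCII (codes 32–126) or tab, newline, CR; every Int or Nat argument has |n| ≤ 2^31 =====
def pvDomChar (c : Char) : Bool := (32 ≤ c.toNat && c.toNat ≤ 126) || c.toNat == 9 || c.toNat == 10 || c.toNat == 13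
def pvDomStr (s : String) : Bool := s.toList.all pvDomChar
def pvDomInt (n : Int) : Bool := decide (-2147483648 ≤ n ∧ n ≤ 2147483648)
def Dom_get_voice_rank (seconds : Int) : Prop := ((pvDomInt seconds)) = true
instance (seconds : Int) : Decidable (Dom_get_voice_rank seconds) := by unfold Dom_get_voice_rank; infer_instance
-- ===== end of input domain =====

-- B replaces A's forward scan-and-track (plus a list.index re-scan) by a binary search for the
-- last threshold ≤ seconds; objective: alternative (8 fixed tiers, no measurable speed change).

-- ===== PORT A =====
-- the module constant VOICE_RANKS (shared by both ports, as in the Python sources)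
def voiceRanks : List (Int × String × String) :=
  [ (0,      "🔇", "Stiller Zuhörer"),
    (3600,   "🔉", "Teilnehmer"),
    (18000,  "🔊", "Gesprächspartner"),
    (36000,  "🎙️", "Redner"),
    (90000,  "⭐", "Aktiver"),
    (180000, "🌟", "Veteran"),
    (360000, "💎", "Elite"),
    (720000, "👑", "Legende") ]

-- the `for r in VOICE_RANKS: if seconds >= r[0]: rank = r else: break` loop
def pvALoop (seconds : Int) : List (Int × String × String) → (Int × String × String) → (Int × String × String)
  | [], rank => rank
  | r :: rs, rank => if seconds ≥ r.1 then pvALoop seconds rs r else rank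

def get_voice_rank (seconds : Int) : String × String × Int × Option Int :=
  -- rank = VOICE_RANKS[0]; the default is never used (the list is nonempty)
  let rank := pvALoop seconds voiceRanks (PySem.List.pyGetD voiceRanks 0 (0, "", ""))
  -- idx = VOICE_RANKS.index(rank); never ValueError since rank ∈ VOICE_RANKS
  let idx : Int := ((PySem.List.index? voiceRanks rank).getD 0 : Nat)
  let next_t : Option Int :=
    if idx + 1 < PySem.List.len voiceRanks then
      some (PySem.List.pyGetD voiceRanks (idx + 1) (0, "", "")).1
    else none
  (rank.2.1, rank.2.2, rank.1, next_t)

-- ===== PORT B =====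
-- the `while lo < hi` binary-search loop of Source B
def pvBSearch (seconds lo hi : Int) : Int :=
  if h : lo < hi then
    let mid := PySem.Int.floordiv (lo + hi) 2
    if (PySem.List.pyGetD voiceRanks mid (0, "", "")).1 ≤ seconds then
      pvBSearch seconds (mid + 1) hi
    else
      pvBSearch seconds lo mid
  else lo
  termination_by (hi - lo).toNat
  decreasing_by
  · have := PySem.Int.floordiv_two_mid_bounds (lo := lo) (hi := hi) (le_of_lt h)
    omega
  · have h2 : PySem.Int.floordiv (lo + hi) 2 < hi :=
      (PySem.Int.floordiv_lt_iff_lt_mul (a := lo + hi) (b := 2) (q := hi) (by omega)).mpr (by omega)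
    omega

def get_voice_rank_alt (seconds : Int) : String × String × Int × Option Int :=
  let lo := pvBSearch seconds 0 (PySem.List.len voiceRanks)
  let idx := max (lo - 1) 0
  let r := PySem.List.pyGetD voiceRanks idx (0, "", "")
  let next_t : Option Int :=
    if idx + 1 < PySem.List.len voiceRanks then
      some (PySem.List.pyGetD voiceRanks (idx + 1) (0, "", "")).1
    else none
  (r.2.1, r.2.2, r.1, next_t)

-- ===== PRECONDITION & SPEC =====
def Spec_get_voice_rank (seconds : Int) (out : String × String × Int × Option Int) : Prop := out = get_voice_rank_alt seconds
instance (seconds : Int) (out : String × String × Int × Option Int) : Decidable (Spec_get_voice_rank seconds out) := by unfold Spec_get_voice_rank; infer_instance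

-- ===== CLAIM (what is proved, stated in full; the proofs are below) =====
def Claim_equal_get_voice_rank : Prop := ∀ (seconds : Int), Dom_get_voice_rank seconds → Spec_get_voice_rank seconds (get_voice_rank seconds)

-- ===== LEMMAS AND PROOFS =====

-- the eight values of VOICE_RANKS.index on members of the table (evaluated once, cited by the main proof)
theorem pvIdx0 : List.idxOf? ((0:Int), "🔇", "Stiller Zuhörer") [((0:Int), "🔇", "Stiller Zuhörer"), ((3600:Int), "🔉", "Teilnehmer"), ((18000:Int), "🔊", "Gesprächspartner"), ((36000:Int), "🎙️", "Redner"), ((90000:Int), "⭐", "Aktiver"), ((180000:Int), "🌟", "Veteran"), ((360000:Int), "💎", "Elite"), ((720000:Int), "👑", "Legende")] = some 0 := by rfl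
theorem pvIdx1 : List.idxOf? ((3600:Int), "🔉", "Teilnehmer") [((0:Int), "🔇", "Stiller Zuhörer"), ((3600:Int), "🔉", "Teilnehmer"), ((18000:Int), "🔊", "Gesprächspartner"), ((36000:Int), "🎙️", "Redner"), ((90000:Int), "⭐", "Aktiver"), ((180000:Int), "🌟", "Veteran"), ((360000:Int), "💎", "Elite"), ((720000:Int), "👑", "Legende")] = some 1 := by rfl
theorem pvIdx2 : List.idxOf? ((18000:Int), "🔊", "Gesprächspartner") [((0:Int), "🔇", "Stiller Zuhörer"), ((3600:Int), "🔉", "Teilnehmer"), ((18000:Int), "🔊", "Gesprächspartner"), ((36000:Int), "🎙️", "Redner"), ((90000:Int), "⭐", "Aktiver"), ((180000:Int), "🌟", "Veteran"), ((360000:Int), "💎", "Elite"), ((720000:Int), "👑", "Legende")] = some 2 := by rfl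
theorem pvIdx3 : List.idxOf? ((36000:Int), "🎙️", "Redner") [((0:Int), "🔇", "Stiller Zuhörer"), ((3600:Int), "🔉", "Teilnehmer"), ((18000:Int), "🔊", "Gesprächspartner"), ((36000:Int), "🎙️", "Redner"), ((90000:Int), "⭐", "Aktiver"), ((180000:Int), "🌟", "Veteran"), ((360000:Int), "💎", "Elite"), ((720000:Int), "👑", "Legende")] = some 3 := by rfl
theorem pvIdx4 : List.idxOf? ((90000:Int), "⭐", "Aktiver") [((0:Int), "🔇", "Stiller Zuhörer"), ((3600:Int), "🔉", "Teilnehmer"), ((18000:Int), "🔊", "Gesprächspartner"), ((36000:Int), "🎙️", "Redner"), ((90000:Int), "⭐", "Aktiver"), ((180000:Int), "🌟", "Veteran"), ((360000:Int), "💎", "Elite"), ((720000:Int), "👑", "Legende")] = some 4 := by rfl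
theorem pvIdx5 : List.idxOf? ((180000:Int), "🌟", "Veteran") [((0:Int), "🔇", "Stiller Zuhörer"), ((3600:Int), "🔉", "Teilnehmer"), ((18000:Int), "🔊", "Gesprächspartner"), ((36000:Int), "🎙️", "Redner"), ((90000:Int), "⭐", "Aktiver"), ((180000:Int), "🌟", "Veteran"), ((360000:Int), "💎", "Elite"), ((720000:Int), "👑", "Legende")] = some 5 := by rfl
theorem pvIdx6 : List.idxOf? ((360000:Int), "💎", "Elite") [((0:Int), "🔇", "Stiller Zuhörer"), ((3600:Int), "🔉", "Teilnehmer"), ((18000:Int), "🔊", "Gesprächspartner"), ((36000:Int), "🎙️", "Redner"), ((90000:Int), "⭐", "Aktiver"), ((180000:Int), "🌟", "Veteran"), ((360000:Int), "💎", "Elite"), ((720000:Int), "👑", "Legende")] = some 6 := by rfl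
theorem pvIdx7 : List.idxOf? ((720000:Int), "👑", "Legende") [((0:Int), "🔇", "Stiller Zuhörer"), ((3600:Int), "🔉", "Teilnehmer"), ((18000:Int), "🔊", "Gesprächspartner"), ((36000:Int), "🎙️", "Redner"), ((90000:Int), "⭐", "Aktiver"), ((180000:Int), "🌟", "Veteran"), ((360000:Int), "💎", "Elite"), ((720000:Int), "👑", "Legende")] = some 7 := by rfl

-- ===== VERDICT (by name: the statement is the Claim_ definition above) =====
set_option maxHeartbeats 2000000 in
theorem get_voice_rank_spec : Claim_equal_get_voice_rank := by
  intro s _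
  unfold Spec_get_voice_rank
  rcases lt_or_ge s 0 with h0 | h0
  · simp [get_voice_rank, get_voice_rank_alt, pvALoop, pvBSearch, voiceRanks, PySem.Int.floordiv, pysem, pvIdx0, (show ¬((0:Int) ≤ s) by omega), (show ¬((3600:Int) ≤ s) by omega), (show ¬((18000:Int) ≤ s) by omega), (show ¬((90000:Int) ≤ s) by omega)]
  rcases lt_or_ge s 3600 with h1 | h1
  · simp [get_voice_rank, get_voice_rank_alt, pvALoop, pvBSearch, voiceRanks, PySem.Int.floordiv, pysem, pvIdx0, (show (0:Int) ≤ s by omega), (show ¬((3600:Int) ≤ s) by omega), (show ¬((18000:Int) ≤ s) by omega), (show ¬((90000:Int) ≤ s) by omega)]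
  rcases lt_or_ge s 18000 with h2 | h2
  · simp [get_voice_rank, get_voice_rank_alt, pvALoop, pvBSearch, voiceRanks, PySem.Int.floordiv, pysem, pvIdx1, (show (0:Int) ≤ s by omega), (show (3600:Int) ≤ s by omega), (show ¬((18000:Int) ≤ s) by omega), (show ¬((90000:Int) ≤ s) by omega)]
  rcases lt_or_ge s 36000 with h3 | h3
  · simp [get_voice_rank, get_voice_rank_alt, pvALoop, pvBSearch, voiceRanks, PySem.Int.floordiv, pysem, pvIdx2, (show (0:Int) ≤ s by omega), (show (3600:Int) ≤ s by omega), (show (18000:Int) ≤ s by omega), (show ¬((36000:Int) ≤ s) by omega), (show ¬((90000:Int) ≤ s) by omega)]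
  rcases lt_or_ge s 90000 with h4 | h4
  · simp [get_voice_rank, get_voice_rank_alt, pvALoop, pvBSearch, voiceRanks, PySem.Int.floordiv, pysem, pvIdx3, (show (0:Int) ≤ s by omega), (show (3600:Int) ≤ s by omega), (show (18000:Int) ≤ s by omega), (show (36000:Int) ≤ s by omega), (show ¬((90000:Int) ≤ s) by omega)]
  rcases lt_or_ge s 180000 with h5 | h5
  · simp [get_voice_rank, get_voice_rank_alt, pvALoop, pvBSearch, voiceRanks, PySem.Int.floordiv, pysem, pvIdx4, (show (0:Int) ≤ s by omega), (show (3600:Int) ≤ s by omega), (show (18000:Int) ≤ s by omega), (show (36000:Int) ≤ s by omega), (show (90000:Int) ≤ s by omega), (show ¬((180000:Int) ≤ s) by omega), (show ¬((360000:Int) ≤ s) by omega)]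
  rcases lt_or_ge s 360000 with h6 | h6
  · simp [get_voice_rank, get_voice_rank_alt, pvALoop, pvBSearch, voiceRanks, PySem.Int.floordiv, pysem, pvIdx5, (show (0:Int) ≤ s by omega), (show (3600:Int) ≤ s by omega), (show (18000:Int) ≤ s by omega), (show (36000:Int) ≤ s by omega), (show (90000:Int) ≤ s by omega), (show (180000:Int) ≤ s by omega), (show ¬((360000:Int) ≤ s) by omega)]
  rcases lt_or_ge s 720000 with h7 | h7
  · simp [get_voice_rank, get_voice_rank_alt, pvALoop, pvBSearch, voiceRanks, PySem.Int.floordiv, pysem, pvIdx6, (show (0:Int) ≤ s by omega), (show (3600:Int) ≤ s by omega), (show (18000:Int) ≤ s by omega), (show (36000:Int) ≤ s by omega), (show (90000:Int) ≤ s by omega), (show (180000:Int) ≤ s by omega), (show (360000:Int) ≤ s by omega), (show ¬((720000:Int) ≤ s) by omega)]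
  simp [get_voice_rank, get_voice_rank_alt, pvALoop, pvBSearch, voiceRanks, PySem.Int.floordiv, pysem, pvIdx7, (show (0:Int) ≤ s by omega), (show (3600:Int) ≤ s by omega), (show (18000:Int) ≤ s by omega), (show (36000:Int) ≤ s by omega), (show (90000:Int) ≤ s by omega), (show (180000:Int) ≤ s by omega), (show (360000:Int) ≤ s by omega), (show (720000:Int) ≤ s by omega)]
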